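-- pv_equiv track=rewrite | github.com/p-org/P | Src/PeasyAI/src/core/rag/p_corpus.py | _extract_types_events
-- ===== SOURCE A (Python) =====
-- def _extract_types_events(content: str) -> str:
--     lines: list[str] = []
--     in_declaration = False
--     for line in content.split("\n"):
--         stripped = line.strip()
--         if in_declaration:
--             lines.append(line)
--             if ";" in stripped or "}" in stripped:
--                 in_declaration = False
--             continue
--         if stripped.startswith(("type ", "event ", "enum ")):
--             lines.append(line)
--             if ";" not in stripped and "{" not in stripped:
--                 in_declaration = True
--             elif "{" in stripped and "}" not in stripped:
--                 in_declaration = True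
--         elif stripped.startswith("//"):
--             lines.append(line)
--     return "\n".join(lines)
-- ===== SOURCE B (Python) =====
-- def _extract_types_events(content: str) -> str:
--     ls = content.split("\n")
--     out = []
--     i = 0
--     n = len(ls)
--     while i < n:
--         line = ls[i]
--         s = line.strip()
--         i += 1
--         if s.startswith(("type ", "event ", "enum ")):
--             out.append(line)
--             if (";" not in s and "{" not in s) or ("{" in s and "}" not in s):
--                 # multi-line declaration: consume lines until the terminator
--                 while i < n:
--                     nxt = ls[i]
--                     t = nxt.strip()
--                     out.append(nxt)
--                     i += 1
--                     if ";" in t or "}" in t: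
--                         break
--         elif s.startswith("//"):
--             out.append(line)
--     return "\n".join(out)
-- ===== Notes on version B (the rewrite author's own statement) =====
-- stated objective: alternative
-- what changed: Replaced the persistent in_declaration boolean flag with an index-driven outer loop plus a nested inner loop that consumes each multi-line declaration block until its terminator.
import Mathlib
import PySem

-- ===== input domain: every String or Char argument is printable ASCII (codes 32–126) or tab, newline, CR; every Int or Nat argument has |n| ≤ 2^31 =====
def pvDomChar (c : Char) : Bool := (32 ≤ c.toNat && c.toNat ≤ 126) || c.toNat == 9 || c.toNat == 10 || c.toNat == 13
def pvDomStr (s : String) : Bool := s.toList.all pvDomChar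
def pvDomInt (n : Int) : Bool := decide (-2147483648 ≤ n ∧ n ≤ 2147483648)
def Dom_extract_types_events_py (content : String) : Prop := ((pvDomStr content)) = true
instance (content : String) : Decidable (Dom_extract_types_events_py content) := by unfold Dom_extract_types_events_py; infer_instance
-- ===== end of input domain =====

-- B replaces A's persistent in_declaration flag with a nested inner loop per declaration block (alternative decomposition, same cost).

-- ===== PORT A =====
-- one iteration of A's for-loop over (lines, in_declaration)
def aStep (st : List String × Bool) (line : String) : List String × Bool :=
  let stripped := PySem.Str.strip line
  if st.2 = true then
    (st.1 ++ [line],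
      if PySem.Str.isIn ";" stripped || PySem.Str.isIn "}" stripped then false else true)
  else if PySem.Str.startswith stripped "type " || PySem.Str.startswith stripped "event " ||
          PySem.Str.startswith stripped "enum " then
    (st.1 ++ [line],
      if !PySem.Str.isIn ";" stripped && !PySem.Str.isIn "{" stripped then true
      else if PySem.Str.isIn "{" stripped && !PySem.Str.isIn "}" stripped then true
      else false)
  else if PySem.Str.startswith stripped "//" then
    (st.1 ++ [line], st.2)
  else st

def extract_types_events_py (content : String) : String :=
  PySem.Str.join "\n" ((((PySem.Str.split? content "\n").getD []).foldl aStep ([], false)).1)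

-- ===== PORT B =====
-- B's inner while-loop: emit lines until one whose strip contains ';' or '}'; returns (emitted, remaining)
def bInner : List String → List String × List String
  | [] => ([], [])
  | ln :: rest =>
    let t := PySem.Str.strip ln
    if PySem.Str.isIn ";" t || PySem.Str.isIn "}" t then ([ln], rest)
    else
      let p := bInner rest
      (ln :: p.1, p.2)

theorem bInner_snd_length (l : List String) : (bInner l).2.length ≤ l.length := by
  induction l with
  | nil => simp [bInner]
  | cons ln rest ih =>
    simp only [bInner]
    split
    · simp
    · simpa using Nat.le_succ_of_le ih

-- B's outer while-loop over the line index
def bGo : List String → List String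
  | [] => []
  | line :: rest =>
    let s := PySem.Str.strip line
    if PySem.Str.startswith s "type " || PySem.Str.startswith s "event " ||
       PySem.Str.startswith s "enum " then
      if (!PySem.Str.isIn ";" s && !PySem.Str.isIn "{" s) ||
         (PySem.Str.isIn "{" s && !PySem.Str.isIn "}" s) then
        let p := bInner rest
        line :: (p.1 ++ bGo p.2)
      else
        line :: bGo rest
    else if PySem.Str.startswith s "//" then
      line :: bGo rest
    else
      bGo rest
  termination_by l => l.length
  decreasing_by
    · exact Nat.lt_succ_of_le (bInner_snd_length rest)
    · simp
    · simp
    · simp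

def extract_types_events_py_alt (content : String) : String :=
  PySem.Str.join "\n" (bGo ((PySem.Str.split? content "\n").getD []))

-- ===== PRECONDITION & SPEC =====
def Spec_extract_types_events_py (content : String) (out : String) : Prop := out = extract_types_events_py_alt content
instance (content : String) (out : String) : Decidable (Spec_extract_types_events_py content out) := by unfold Spec_extract_types_events_py; infer_instance

-- ===== CLAIM (what is proved, stated in full; the proofs are below) =====
def Claim_equal_extract_types_events_py : Prop := ∀ (content : String), Dom_extract_types_events_py content → Spec_extract_types_events_py content (extract_types_events_py content)

-- ===== LEMMAS AND PROOFS =====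

-- while in_declaration, A's foldl emits exactly B's inner block, then resumes with the flag cleared
theorem foldl_aStep_true (l : List String) (acc : List String) :
    (l.foldl aStep (acc, true)).1 =
      ((bInner l).2.foldl aStep (acc ++ (bInner l).1, false)).1 := by
  induction l generalizing acc with
  | nil => simp [bInner]
  | cons ln rest ih =>
    cases h1 : PySem.Chars.isIn [';'] (PySem.Chars.strip ln.toList) with
    | true => simp [bInner, aStep, h1]
    | false =>
      cases h2 : PySem.Chars.isIn ['}'] (PySem.Chars.strip ln.toList) with
      | true => simp [bInner, aStep, h1, h2]
      | false => simp [bInner, aStep, h1, h2, ih]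

-- with the flag down, A's foldl appends exactly bGo of the remaining lines
theorem foldl_aStep_false (l : List String) (acc : List String) :
    (l.foldl aStep (acc, false)).1 = acc ++ bGo l := by
  induction hl : l.length using Nat.strong_induction_on generalizing l acc with
  | _ n ih =>
  subst hl
  cases l with
  | nil => simp [bGo]
  | cons line rest =>
    have ihrest := fun acc => ih rest.length (Nat.lt_succ_self _) rest acc rfl
    have ihinner := fun acc => ih (bInner rest).2.length
      (Nat.lt_succ_of_le (bInner_snd_length rest)) (bInner rest).2 acc rfl
    by_cases hd : ((PySem.Chars.startswith (PySem.Chars.strip line.toList) ['t','y','p','e',' '] = true ∨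
        PySem.Chars.startswith (PySem.Chars.strip line.toList) ['e','v','e','n','t',' '] = true) ∨
        PySem.Chars.startswith (PySem.Chars.strip line.toList) ['e','n','u','m',' '] = true)
    · cases hb : PySem.Chars.isIn ['{'] (PySem.Chars.strip line.toList) with
      | true =>
        cases hc : PySem.Chars.isIn ['}'] (PySem.Chars.strip line.toList) with
        | true =>
          -- '{' and '}' on the head line: self-closing
          simp [bGo, aStep, hd, hb, hc, ihrest]
        | false =>
          -- '{' without '}': multi-line block
          simp only [List.foldl_cons, aStep, bGo]
          simp [hd, hb, hc]
          rw [foldl_aStep_true, ihinner]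
          simp
      | false =>
        cases hs : PySem.Chars.isIn [';'] (PySem.Chars.strip line.toList) with
        | true =>
          -- terminated by ';': self-closing
          simp [bGo, aStep, hd, hb, hs, ihrest]
        | false =>
          -- neither ';' nor '{': multi-line block
          simp only [List.foldl_cons, aStep, bGo]
          simp [hd, hb, hs]
          rw [foldl_aStep_true, ihinner]
          simp
    · by_cases hcom : PySem.Chars.startswith (PySem.Chars.strip line.toList) ['/','/'] = true
      · simp [bGo, aStep, hd, hcom, ihrest]
      · simp [bGo, aStep, hd, hcom, ihrest]

-- ===== VERDICT (by name: the statement is the Claim_ definition above) =====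
theorem extract_types_events_py_spec : Claim_equal_extract_types_events_py := by
  intro content _
  unfold Spec_extract_types_events_py extract_types_events_py extract_types_events_py_alt
  rw [foldl_aStep_false]
  simp
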